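-- pv_equiv track=rewrite | github.com/Borginz/MC102 | tarefa10/bordas.py | destacar_bordas
-- ===== SOURCE A (Python) =====
-- def destacar_bordas(largura, altura, imagem):
--     nova_imagem = []
--     for _ in range(altura):
--         nova_imagem.append([])
--     for i in range(altura):
--         for j in range(largura):
--             if i == 0 or j == 0 or i == altura - 1 or j == largura - 1:
--                 nova_imagem[i].append(imagem[i][j])
--             else:
--                 if imagem[i][j] == '1':
--                     if imagem[i-1][j] == '0' or imagem[i+1][j] == '0' or imagem[i][j-1] == '0' or imagem[i][j+1] == '0' or imagem[i+1][j+1] == '0' or imagem[i+1][j-1] == '0' or imagem[i-1][j+1] == '0' or imagem[i-1][j-1] == '0':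
--                         nova_imagem[i].append('1')
--                     else:
--                         nova_imagem[i].append('0')
--                 else:
--                     nova_imagem[i].append('0')
--     return nova_imagem
-- ===== SOURCE B (Python) =====
-- def destacar_bordas(largura, altura, imagem):
--     # zero mask, then a separable (horizontal pass + vertical combine) 3x3 dilation of it
--     zero = [[imagem[i][j] == '0' for j in range(largura)] for i in range(altura)]
--     hz = [[row[j - 1] or row[j] or row[j + 1] for j in range(1, largura - 1)]
--           for row in zero]
--     nova = [[imagem[i][j]
--              if i == 0 or j == 0 or i == altura - 1 or j == largura - 1
--              else ('1' if imagem[i][j] == '1'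
--                    and (hz[i - 1][j - 1] or hz[i][j - 1] or hz[i + 1][j - 1])
--                    else '0')
--              for j in range(largura)]
--             for i in range(altura)]
--     return nova
-- ===== Notes on version B (the rewrite author's own statement) =====
-- stated objective: alternative
-- what changed: The per-pixel 8-neighbour scan is replaced by precomputing a boolean zero-mask and its separable 3x3 dilation (one horizontal 3-window pass per row, then a vertical combine of three precomputed rows); the final pass only consults the precomputed hz table, and the window's centre term is provably false whenever the pixel is '1', so the result matches A exactly.
import Mathlib
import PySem

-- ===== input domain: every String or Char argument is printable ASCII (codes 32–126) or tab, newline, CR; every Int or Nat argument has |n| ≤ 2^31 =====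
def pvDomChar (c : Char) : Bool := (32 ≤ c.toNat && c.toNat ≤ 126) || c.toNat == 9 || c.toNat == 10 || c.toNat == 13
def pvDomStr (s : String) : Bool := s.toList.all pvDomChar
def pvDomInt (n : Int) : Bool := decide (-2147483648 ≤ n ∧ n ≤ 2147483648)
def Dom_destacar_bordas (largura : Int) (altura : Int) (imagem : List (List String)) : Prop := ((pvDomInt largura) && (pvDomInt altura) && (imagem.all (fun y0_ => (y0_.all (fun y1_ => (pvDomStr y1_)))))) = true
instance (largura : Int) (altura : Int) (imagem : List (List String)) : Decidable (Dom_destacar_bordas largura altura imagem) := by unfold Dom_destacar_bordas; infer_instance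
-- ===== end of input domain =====

-- B replaces A's per-pixel 8-neighbour scan by a precomputed zero-mask and a separable (horizontal pass + vertical combine) 3x3 dilation of it (alternative algorithm, same cost).


-- shared indexing helper: imagem[i][j]; exact under Pre_ (all indices the ports use are in range there)
def pvPx (imagem : List (List String)) (i j : Int) : String :=
  PySem.List.pyGetD (PySem.List.pyGetD imagem i []) j ""

-- ===== PORT A =====
def destacar_bordas (largura : Int) (altura : Int) (imagem : List (List String)) : List (List String) :=
  -- nova_imagem starts as altura empty rows; row i is filled exactly during iteration i,
  -- so the two loops are transliterated as: for each i append the row built by the j-loop.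
  (PySem.List.pyRange 0 altura 1).foldl (fun nova_imagem i =>
    nova_imagem ++ [ (PySem.List.pyRange 0 largura 1).foldl (fun row j =>
      row ++ [ if i == 0 || j == 0 || i == altura - 1 || j == largura - 1 then
                 pvPx imagem i j
               else
                 if pvPx imagem i j == "1" then
                   if pvPx imagem (i-1) j == "0" || pvPx imagem (i+1) j == "0" ||
                      pvPx imagem i (j-1) == "0" || pvPx imagem i (j+1) == "0" ||
                      pvPx imagem (i+1) (j+1) == "0" || pvPx imagem (i+1) (j-1) == "0" ||
                      pvPx imagem (i-1) (j+1) == "0" || pvPx imagem (i-1) (j-1) == "0" then "1"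
                   else "0"
                 else "0" ]) [] ]) []

-- ===== PORT B =====
-- Source B's 'zero' comprehension: the boolean zero-mask of the image block
def pvZeroRow (largura : Int) (imagem : List (List String)) (i : Int) : List Bool :=
  (PySem.List.pyRange 0 largura 1).map (fun j => pvPx imagem i j == "0")
def pvZero (largura altura : Int) (imagem : List (List String)) : List (List Bool) :=
  (PySem.List.pyRange 0 altura 1).map (pvZeroRow largura imagem)
-- Source B's 'hz' comprehension: horizontal 3-window dilation of each mask row (columns 1..largura-2)
def pvHz (largura altura : Int) (imagem : List (List String)) : List (List Bool) :=
  (pvZero largura altura imagem).map (fun row =>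
    (PySem.List.pyRange 1 (largura - 1) 1).map (fun j =>
      PySem.List.pyGetD row (j-1) false || PySem.List.pyGetD row j false ||
      PySem.List.pyGetD row (j+1) false))

def destacar_bordas_alt (largura : Int) (altura : Int) (imagem : List (List String)) : List (List String) :=
  -- final comprehension: borders copied; interior = '1' iff pixel is '1' and the vertical
  -- combine of the three hz rows (= 3x3 dilation of the zero mask) fires
  (PySem.List.pyRange 0 altura 1).map (fun i =>
    (PySem.List.pyRange 0 largura 1).map (fun j =>
      if i == 0 || j == 0 || i == altura - 1 || j == largura - 1 then
        pvPx imagem i j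
      else if pvPx imagem i j == "1" &&
          (PySem.List.pyGetD (PySem.List.pyGetD (pvHz largura altura imagem) (i-1) []) (j-1) false ||
           PySem.List.pyGetD (PySem.List.pyGetD (pvHz largura altura imagem) i []) (j-1) false ||
           PySem.List.pyGetD (PySem.List.pyGetD (pvHz largura altura imagem) (i+1) []) (j-1) false) then "1"
      else "0"))

-- ===== PRECONDITION & SPEC =====
-- Pre_ excludes exactly the inputs where Python A raises IndexError (imagem shorter than altura,
-- or one of the first altura rows shorter than largura, with both dimensions positive); B raises there too.
def Pre_destacar_bordas (largura : Int) (altura : Int) (imagem : List (List String)) : Prop :=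
  largura ≤ 0 ∨ altura ≤ 0 ∨
    (altura ≤ imagem.length ∧ ∀ r ∈ imagem.take altura.toNat, largura ≤ r.length)
instance (largura : Int) (altura : Int) (imagem : List (List String)) : Decidable (Pre_destacar_bordas largura altura imagem) := by unfold Pre_destacar_bordas; infer_instance
def pvWitness_destacar_bordas : Int × Int × List (List String) :=
  (3, 3, [["1","1","1"],["1","1","0"],["0","1","1"]])

def Spec_destacar_bordas (largura : Int) (altura : Int) (imagem : List (List String)) (out : List (List String)) : Prop := out = destacar_bordas_alt largura altura imagem
instance (largura : Int) (altura : Int) (imagem : List (List String)) (out : List (List String)) : Decidable (Spec_destacar_bordas largura altura imagem out) := by unfold Spec_destacar_bordas; infer_instance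

-- ===== CLAIM (what is proved, stated in full; the proofs are below) =====
def Claim_equal_destacar_bordas : Prop := ∀ (largura : Int) (altura : Int) (imagem : List (List String)), Dom_destacar_bordas largura altura imagem → Pre_destacar_bordas largura altura imagem → Spec_destacar_bordas largura altura imagem (destacar_bordas largura altura imagem)

-- ===== LEMMAS AND PROOFS =====

-- indexing B's hz rows: hz-row entry j-1 is the 3-window at column j
theorem pvGetHzRow {α : Type} (f : Int → α) (W j : Int) (d : α)
    (h1 : 1 ≤ j) (h2 : j < W - 1) :
    PySem.List.pyGetD ((PySem.List.pyRange 1 (W-1) 1).map f) (j-1) d = f j := by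
  have hj : (j - 1) = (((j-1).toNat : Nat) : Int) := by omega
  rw [hj, PySem.List.pyGetD_map_pyRange_one f 1 (W-1) (j-1).toNat d (by omega)]
  congr 1
  omega

-- ===== VERDICT (by name: the statement is the Claim_ definition above) =====
theorem destacar_bordas_spec : Claim_equal_destacar_bordas := by
  intro largura altura imagem _ _
  unfold Spec_destacar_bordas
  unfold destacar_bordas destacar_bordas_alt
  simp only [PySem.List.foldl_append_singleton_eq_map, List.nil_append]
  apply List.map_congr_left
  intro i hi
  rw [PySem.List.mem_pyRange_one] at hi
  apply List.map_congr_left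
  intro j hj
  rw [PySem.List.mem_pyRange_one] at hj
  by_cases hB : (i == 0 || j == 0 || i == altura - 1 || j == largura - 1) = true
  · rw [hB]; simp only [if_true]
  · rw [Bool.not_eq_true] at hB
    rw [hB]
    simp only [Bool.false_eq_true, if_false]
    have hIJ : 1 ≤ i ∧ i < altura - 1 ∧ 1 ≤ j ∧ j < largura - 1 := by
      simp only [Bool.or_eq_false_iff, beq_eq_false_iff_ne, ne_eq] at hB
      omega
    obtain ⟨hi1, hi2, hj1, hj2⟩ := hIJ
    -- evaluate the three hz lookups
    have hrow : ∀ a : Int, 0 ≤ a → a < altura →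
        PySem.List.pyGetD (PySem.List.pyGetD (pvHz largura altura imagem) a []) (j-1) false
          = ((pvPx imagem a (j-1) == "0") || (pvPx imagem a j == "0") ||
             (pvPx imagem a (j+1) == "0")) := by
      intro a ha1 ha2
      unfold pvHz pvZero
      rw [List.map_map]
      rw [PySem.List.pyGetD_map_pyRange_of_nonneg _ altura a [] ha1 ha2]
      simp only [Function.comp]
      rw [pvGetHzRow _ largura j false hj1 hj2]
      unfold pvZeroRow
      rw [PySem.List.pyGetD_map_pyRange_of_nonneg _ largura (j-1) false (by omega) (by omega),
          PySem.List.pyGetD_map_pyRange_of_nonneg _ largura j false (by omega) (by omega),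
          PySem.List.pyGetD_map_pyRange_of_nonneg _ largura (j+1) false (by omega) (by omega)]
    rw [hrow (i-1) (by omega) (by omega), hrow i (by omega) (by omega),
        hrow (i+1) (by omega) (by omega)]
    -- per-pixel boolean identity: the 3x3-window 'or' equals A's 8-neighbour 'or',
    -- since the centre term is false whenever the pixel is '1'
    by_cases hp : (pvPx imagem i j == "1") = true
    · rw [hp]
      rw [beq_iff_eq] at hp
      rw [hp]
      simp only [if_true, Bool.true_and]
      have hc : (("1" : String) == "0") = false := by decide
      rw [hc]
      generalize (pvPx imagem (i-1) j == "0") = b1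
      generalize (pvPx imagem (i+1) j == "0") = b2
      generalize (pvPx imagem i (j-1) == "0") = b3
      generalize (pvPx imagem i (j+1) == "0") = b4
      generalize (pvPx imagem (i+1) (j+1) == "0") = b5
      generalize (pvPx imagem (i+1) (j-1) == "0") = b6
      generalize (pvPx imagem (i-1) (j+1) == "0") = b7
      generalize (pvPx imagem (i-1) (j-1) == "0") = b8
      revert b1 b2 b3 b4 b5 b6 b7 b8
      decide
    · rw [Bool.not_eq_true] at hp
      rw [hp]
      simp only [Bool.false_eq_true, if_false, Bool.false_and]
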